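-- pv_equiv track=rewrite | github.com/Kerram/bert | tree_parser.py | find_end_of_subtree
-- ===== SOURCE A (Python) =====
-- def find_end_of_subtree(sentence, pos):
--   if sentence[pos] != "(":
--   	return pos
--   sum = 1
--   while sum > 0:
--   	pos += 1
--   	if sentence[pos] == "(":
--   	  sum += 1
--   	elif sentence[pos] == ")":
--   	  sum -= 1
--   	if sum == 0:
--   	  return pos
--   return -1
-- ===== SOURCE B (Python) =====
-- def find_end_of_subtree(sentence, pos):
--   if sentence[pos] != "(":
--     return pos
--   pos += 1
--   while sentence[pos] != ")":
--     pos = find_end_of_subtree(sentence, pos) + 1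
--   return pos
-- ===== Notes on version B (the rewrite author's own statement) =====
-- stated objective: alternative
-- what changed: A finds the matching close-paren with a single flat loop that maintains a paren-depth counter; B instead recurses over the tree nesting, skipping each child subtree with a recursive call and never counting depth.
import Mathlib
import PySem

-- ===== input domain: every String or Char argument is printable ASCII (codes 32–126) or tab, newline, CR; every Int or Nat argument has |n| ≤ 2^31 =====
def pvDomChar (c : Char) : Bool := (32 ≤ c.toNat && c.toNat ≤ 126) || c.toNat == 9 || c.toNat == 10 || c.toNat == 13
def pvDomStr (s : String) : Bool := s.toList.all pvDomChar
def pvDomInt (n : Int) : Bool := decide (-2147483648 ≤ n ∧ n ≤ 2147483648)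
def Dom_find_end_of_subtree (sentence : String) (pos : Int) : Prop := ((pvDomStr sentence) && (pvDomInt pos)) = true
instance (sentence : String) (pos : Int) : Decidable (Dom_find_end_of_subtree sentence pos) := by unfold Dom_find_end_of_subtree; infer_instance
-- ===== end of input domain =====

-- B replaces A's flat paren-depth-counter loop by recursive descent over the tree nesting
-- (skip each child subtree by a recursive call); objective: alternative decomposition, same cost.

-- ===== PORT A =====
-- A's while loop: state (pos, sum); fuel only makes it total (none = IndexError, excluded by Pre_).
def goA (s : List Char) (pos sum : Int) : Nat → Option Int
  | 0 => none
  | fuel+1 =>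
    if sum ≤ 0 then some (-1)          -- while condition false → "return -1" (unreachable from sum = 1)
    else
      match PySem.List.pyGet? s (pos + 1) with
      | none => none                    -- IndexError
      | some ch =>
        let sum' := if ch = '(' then sum + 1 else if ch = ')' then sum - 1 else sum
        if sum' = 0 then some (pos + 1) else goA s (pos + 1) sum' fuel

def find_end_of_subtree (sentence : String) (pos : Int) : Int :=
  let s := sentence.toList
  match PySem.List.pyGet? s pos with
  | none => -2                          -- IndexError (excluded by Pre_)
  | some ch =>
    if ch ≠ '(' then pos
    else (goA s pos 1 (2 * s.length + 2)).getD (-2)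

-- ===== PORT B =====
-- B's recursion: goB = find_end_of_subtree body, loopB = its while loop; fuel only makes it total.
mutual
def goB (s : List Char) (pos : Int) (fuel : Nat) : Option Int :=
  match PySem.List.pyGet? s pos with
  | none => none
  | some ch => if ch ≠ '(' then some pos else loopB s (pos + 1) fuel
termination_by 2 * fuel + 1

def loopB (s : List Char) (pos : Int) (fuel : Nat) : Option Int :=
  match fuel with
  | 0 => none
  | fuel'+1 =>
    match PySem.List.pyGet? s pos with
    | none => none
    | some ch =>
      if ch = ')' then some pos
      else
        match goB s pos fuel' with
        | none => none
        | some e => loopB s (e + 1) fuel'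
termination_by 2 * fuel
end

def find_end_of_subtree_alt (sentence : String) (pos : Int) : Int :=
  let s := sentence.toList
  match goB s pos (2 * s.length + 2) with
  | some r => r
  | none => -2

-- ===== PRECONDITION & SPEC =====
-- the character stream A scans starting at index pos (Python negative indices wrap, so for
-- pos < 0 the scan runs to the end of the string and then wraps to its beginning)
def pvStream (s : List Char) (pos : Int) : List Char :=
  if pos < 0 then s.drop (s.length + pos).toNat ++ s else s.drop pos.toNat

def pvBal (u : List Char) : Int := (u.count '(' : Int) - (u.count ')' : Int)

-- Pre_: pos is a valid (possibly negative) index, and if it holds '(' then some later scanned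
-- prefix closes it (paren balance reaches -1); otherwise A (and B) raise IndexError.
def Pre_find_end_of_subtree (sentence : String) (pos : Int) : Prop :=
  (PySem.List.pyGet? sentence.toList pos).isSome = true ∧
  (PySem.List.pyGet? sentence.toList pos = some '(' →
    ∃ j, j < ((pvStream sentence.toList pos).drop 1).length ∧
      pvBal (((pvStream sentence.toList pos).drop 1).take (j + 1)) = -1)

instance (sentence : String) (pos : Int) : Decidable (Pre_find_end_of_subtree sentence pos) := by
  unfold Pre_find_end_of_subtree; infer_instance

def pvWitness_find_end_of_subtree : String × Int := ("(a)", 0)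

def Spec_find_end_of_subtree (sentence : String) (pos : Int) (out : Int) : Prop := out = find_end_of_subtree_alt sentence pos
instance (sentence : String) (pos : Int) (out : Int) : Decidable (Spec_find_end_of_subtree sentence pos out) := by unfold Spec_find_end_of_subtree; infer_instance

-- ===== CLAIM (what is proved, stated in full; the proofs are below) =====
def Claim_equal_find_end_of_subtree : Prop := ∀ (sentence : String) (pos : Int), Dom_find_end_of_subtree sentence pos → Pre_find_end_of_subtree sentence pos → Spec_find_end_of_subtree sentence pos (find_end_of_subtree sentence pos)

-- ===== LEMMAS AND PROOFS =====

-- pure version of A's scan over the stream of characters it will read (proof device)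
def pureA (sum : Int) : List Char → Option Nat
  | [] => none
  | c :: rest =>
    let sum' := if c = '(' then sum + 1 else if c = ')' then sum - 1 else sum
    if sum' = 0 then some 0 else (pureA sum' rest).map (· + 1)

theorem pvBal_cons (c : Char) (u : List Char) :
    pvBal (c :: u) = (if c = '(' then 1 else if c = ')' then -1 else 0) + pvBal u := by
  by_cases h1 : c = '(' <;> by_cases h2 : c = ')' <;>
    simp [pvBal, h1, h2] <;> ring

-- the stream really is what A reads: character k of the tail of the stream = sentence[pos+1+k]
theorem streamGet (s : List Char) (pos : Int) (h : (PySem.List.pyGet? s pos).isSome = true) :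
    ∀ k : Nat, PySem.List.pyGet? s (pos + 1 + k) = ((pvStream s pos).drop 1)[k]? := by
  intro k
  have hrange : ¬ (PySem.List.pyGet? s pos = none) := by
    intro hn; rw [hn] at h; simp at h
  rw [PySem.List.pyGet?_eq_none_iff] at hrange
  push_neg at hrange
  have hb : -(s.length : Int) ≤ pos ∧ pos < s.length := by
    simpa [PySem.Raise.InRange] using hrange
  obtain ⟨hlo, hhi⟩ := hb
  by_cases hp : 0 ≤ pos
  · -- nonnegative index: stream = s.drop pos
    have h1 : pvStream s pos = s.drop pos.toNat := by
      rw [pvStream, if_neg (by omega)]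
    rw [h1, PySem.List.pyGet?_of_nonneg _ (show (0:Int) ≤ pos + 1 + k by omega),
      List.drop_drop, List.getElem?_drop]
    congr 1
    omega
  · -- negative index: stream = s.drop (n+pos) ++ s, the scan wraps at the end of s
    push_neg at hp
    have hin : ((s.length : Int) + pos).toNat < s.length := by omega
    have h1 : (pvStream s pos).drop 1 = s.drop (((s.length : Int) + pos).toNat + 1) ++ s := by
      rw [pvStream, if_pos hp]
      rw [List.drop_append_of_le_length (by simp; omega), List.drop_drop]
    rw [h1]
    by_cases hq : pos + 1 + k < 0
    · -- still a negative raw index: reads s[n + (pos+1+k)]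
      rw [List.getElem?_append_left (by simp; omega)]
      have := PySem.List.pyGet?_neg_natCast s (-(pos + 1 + k)).toNat (by omega)
        (by omega)
      rw [show (-(((-(pos + 1 + k)).toNat : Nat) : Int)) = pos + 1 + k by omega] at this
      rw [this, List.getElem?_drop]
      congr 1
      omega
    · -- wrapped past the end: raw index is now nonnegative, reads s[pos+1+k]
      push_neg at hq
      rw [List.getElem?_append_right (by simp; omega)]
      rw [PySem.List.pyGet?_of_nonneg _ hq]
      congr 1
      simp
      omega

-- goA computes pureA on the stream it reads
theorem bridgeA (s : List Char) :
    ∀ (t : List Char) (pos sum : Int) (f : Nat), 1 ≤ sum → t.length < f →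
    (∀ k : Nat, PySem.List.pyGet? s (pos + 1 + k) = t[k]?) →
    goA s pos sum f = (pureA sum t).map (fun k => pos + 1 + (k : Int)) := by
  intro t
  induction t with
  | nil =>
    intro pos sum f hs hf H
    match f, hf with
    | f + 1, _ =>
      have h0 := H 0
      simp at h0
      simp [goA, pureA, h0, show ¬ sum ≤ 0 by omega]
  | cons c rest ih =>
    intro pos sum f hs hf H
    match f, hf with
    | f + 1, hf =>
      have h0 := H 0
      simp at h0
      have Hr : ∀ k : Nat, PySem.List.pyGet? s (pos + 1 + 1 + k) = rest[k]? := by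
        intro k
        have h2 := H (k + 1)
        push_cast at h2
        rw [show pos + 1 + ((k : Int) + 1) = pos + 1 + 1 + (k : Int) by ring] at h2
        simpa using h2
      have hδ : (-1:Int) ≤ (if c = '(' then sum + 1 else if c = ')' then sum - 1 else sum) - sum := by
        split_ifs <;> omega
      by_cases hz : (if c = '(' then sum + 1 else if c = ')' then sum - 1 else sum) = 0
      · simp [goA, pureA, h0, show ¬ sum ≤ 0 by omega, hz]
      · have hs' : 1 ≤ (if c = '(' then sum + 1 else if c = ')' then sum - 1 else sum) := by
          split_ifs at hz hδ ⊢ <;> omega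
        rw [show (goA s pos sum (f + 1)) =
              goA s (pos + 1) (if c = '(' then sum + 1 else if c = ')' then sum - 1 else sum) f by
            simp [goA, h0, show ¬ sum ≤ 0 by omega, hz]]
        rw [ih (pos + 1) _ f hs' (by simpa using Nat.lt_of_succ_lt_succ hf) Hr]
        cases hrec : pureA (if c = '(' then sum + 1 else if c = ')' then sum - 1 else sum) rest with
        | none => simp [pureA, if_neg hz, hrec]
        | some k =>
          simp [pureA, if_neg hz, hrec]
          push_cast
          ring

-- pureA succeeds whenever some scanned prefix brings the balance down to -sum
theorem pureA_some : ∀ (t : List Char) (sum : Int), 1 ≤ sum →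
    (∃ j, j < t.length ∧ sum + pvBal (t.take (j + 1)) = 0) →
    (pureA sum t).isSome = true := by
  intro t
  induction t with
  | nil => intro sum _ ⟨j, hj, _⟩; simp at hj
  | cons c rest ih =>
    intro sum hs ⟨j, hj, hbal⟩
    have hδ : (-1:Int) ≤ (if c = '(' then sum + 1 else if c = ')' then sum - 1 else sum) - sum := by
      split_ifs <;> omega
    by_cases hz : (if c = '(' then sum + 1 else if c = ')' then sum - 1 else sum) = 0
    · simp [pureA, hz]
    · have hs' : 1 ≤ (if c = '(' then sum + 1 else if c = ')' then sum - 1 else sum) := by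
        split_ifs at hz hδ ⊢ <;> omega
      have hex : (pureA (if c = '(' then sum + 1 else if c = ')' then sum - 1 else sum) rest).isSome = true := by
        apply ih _ hs'
        match j with
        | 0 =>
          exfalso
          simp [pvBal_cons] at hbal
          split_ifs at hbal hz <;> simp [pvBal] at hbal <;> omega
        | j' + 1 =>
          refine ⟨j', by simpa using hj, ?_⟩
          have : pvBal ((c :: rest).take (j' + 1 + 1)) =
              (if c = '(' then 1 else if c = ')' then -1 else 0) + pvBal (rest.take (j' + 1)) := by
            simp [pvBal_cons]
          rw [this] at hbal
          split_ifs at hbal hz ⊢ <;> omega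
      obtain ⟨k, hk⟩ := Option.isSome_iff_exists.mp hex
      simp [pureA, hz, hk]

-- goA succeeds with more fuel too
theorem monoA (s : List Char) : ∀ (f : Nat) (pos sum r : Int) (g : Nat),
    goA s pos sum f = some r → f ≤ g → goA s pos sum g = some r := by
  intro f
  induction f with
  | zero => intro pos sum r g h; simp [goA] at h
  | succ f ih =>
    intro pos sum r g h hle
    match g, hle with
    | g + 1, hle =>
      by_cases h0 : sum ≤ 0
      · simpa [goA, h0] using h
      · simp only [goA, if_neg h0] at h ⊢
        match hch : PySem.List.pyGet? s (pos + 1) with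
        | none => rw [hch] at h; exact h
        | some ch =>
          rw [hch] at h
          dsimp only at h ⊢
          by_cases hz : (if ch = '(' then sum + 1 else if ch = ')' then sum - 1 else sum) = 0
          · simpa [hz] using h
          · simp only [if_neg hz] at h ⊢
            exact ih _ _ _ _ h (Nat.le_of_succ_le_succ hle)

-- splitting A's scan: reaching 0 from depth a+b passes through reaching 0 from depth a
theorem shiftA (s : List Char) : ∀ (f : Nat) (pos a b r : Int), 1 ≤ a → 1 ≤ b →
    goA s pos (a + b) f = some r →
    ∃ e, goA s pos a f = some e ∧ goA s e b f = some r := by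
  intro f
  induction f with
  | zero => intro pos a b r _ _ h; simp [goA] at h
  | succ f ih =>
    intro pos a b r ha hb h
    simp only [goA, if_neg (show ¬ a + b ≤ 0 by omega)] at h
    match hch : PySem.List.pyGet? s (pos + 1) with
    | none => rw [hch] at h; exact absurd h (by simp)
    | some ch =>
      rw [hch] at h
      dsimp only at h
      by_cases hc1 : ch = '('
      · -- depth rises: recurse with a+1
        rw [if_pos hc1, if_neg (show ¬ a + b + 1 = 0 by omega)] at h
        rw [show a + b + 1 = (a + 1) + b by ring] at h
        obtain ⟨e, he1, he2⟩ := ih (pos + 1) (a + 1) b r (by omega) hb h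
        refine ⟨e, ?_, monoA s f e b r (f + 1) he2 (Nat.le_succ f)⟩
        simp [goA, hch, hc1, show ¬ a ≤ 0 by omega, show ¬ a + 1 = 0 by omega, he1]
      · by_cases hc2 : ch = ')'
        · rw [if_neg hc1, if_pos hc2, if_neg (show ¬ a + b - 1 = 0 by omega)] at h
          by_cases ha1 : a = 1
          · -- the a-scan closes right here
            refine ⟨pos + 1, ?_, ?_⟩
            · simp [goA, hch, hc1, hc2, show ¬ a ≤ 0 by omega, show a - 1 = 0 by omega]
            · rw [show a + b - 1 = b by omega] at h
              exact monoA s f (pos + 1) b r (f + 1) h (Nat.le_succ f)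
          · rw [show a + b - 1 = (a - 1) + b by ring] at h
            obtain ⟨e, he1, he2⟩ := ih (pos + 1) (a - 1) b r (by omega) hb h
            refine ⟨e, ?_, monoA s f e b r (f + 1) he2 (Nat.le_succ f)⟩
            simp [goA, hch, hc1, hc2, show ¬ a ≤ 0 by omega, show ¬ a - 1 = 0 by omega, he1]
        · rw [if_neg hc1, if_neg hc2, if_neg (show ¬ a + b = 0 by omega)] at h
          obtain ⟨e, he1, he2⟩ := ih (pos + 1) a b r ha hb h
          refine ⟨e, ?_, monoA s f e b r (f + 1) he2 (Nat.le_succ f)⟩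
          simp [goA, hch, hc1, hc2, show ¬ a ≤ 0 by omega, show ¬ a = 0 by omega, he1]

-- B's while loop tracks A's depth-1 states
theorem loopB_eq (s : List Char) : ∀ (f : Nat) (F : Nat) (pos r : Int), f ≤ F →
    goA s pos 1 f = some r → loopB s (pos + 1) F = some r := by
  intro f
  induction f using Nat.strong_induction_on with
  | _ f ih =>
    intro F pos r hle h
    match f, h with
    | f + 1, h =>
    match F, hle with
    | F + 1, hle =>
      simp only [goA, if_neg (show ¬ (1:Int) ≤ 0 by omega)] at h
      match hch : PySem.List.pyGet? s (pos + 1) with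
      | none => rw [hch] at h; exact absurd h (by simp)
      | some ch =>
        rw [hch] at h
        dsimp only at h
        by_cases hc1 : ch = '('
        · -- a child subtree starts: B skips it with the recursive call (goB), A counts through it
          rw [if_pos hc1, if_neg (by omega : ¬ (1:Int) + 1 = 0)] at h
          obtain ⟨e, he1, he2⟩ := shiftA s f (pos + 1) 1 1 r (by omega) (by omega) h
          unfold loopB
          rw [hch]
          dsimp only
          simp only [if_neg (show ¬ ch = ')' by simp [hc1])]
          have hgoB : goB s (pos + 1) F = some e := by
            unfold goB
            rw [hch]
            dsimp only
            simp only [if_neg (show ¬ ch ≠ '(' by simp [hc1])]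
            exact ih f (Nat.lt_succ_self f) F (pos + 1) e (Nat.le_of_succ_le_succ hle) he1
          rw [hgoB]
          exact ih f (Nat.lt_succ_self f) F e r (Nat.le_of_succ_le_succ hle) he2
        · by_cases hc2 : ch = ')'
          · -- the subtree closes here: both return this position
            rw [if_neg hc1, if_pos hc2] at h
            simp at h
            unfold loopB
            rw [hch]
            dsimp only
            rw [if_pos hc2, h]
          · -- plain character: both step over it
            rw [if_neg hc1, if_neg hc2, if_neg (by omega : ¬ (1:Int) = 0)] at h
            unfold loopB
            rw [hch]
            dsimp only
            simp only [if_neg hc2]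
            have hgoB : goB s (pos + 1) F = some (pos + 1) := by
              unfold goB
              rw [hch]
              simp [hc1]
            rw [hgoB]
            exact ih f (Nat.lt_succ_self f) F (pos + 1) r (Nat.le_of_succ_le_succ hle) h

theorem stream_len_lt (s : List Char) (pos : Int) :
    ((pvStream s pos).drop 1).length < 2 * s.length + 2 := by
  simp [pvStream]
  split <;> simp <;> omega

-- ===== VERDICT (by name: the statement is the Claim_ definition above) =====
theorem find_end_of_subtree_spec : Claim_equal_find_end_of_subtree := by
  intro sentence pos _ hpre
  obtain ⟨hsome, hmatch⟩ := hpre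
  obtain ⟨c, hc⟩ := Option.isSome_iff_exists.mp hsome
  unfold Spec_find_end_of_subtree find_end_of_subtree find_end_of_subtree_alt
  dsimp only
  rw [hc]
  dsimp only
  by_cases hpar : c = '('
  · -- '(' at pos: A's counter and B's recursion both find the matching ')'
    subst hpar
    obtain ⟨j, hj, hbal⟩ := hmatch hc
    have hpure := pureA_some ((pvStream sentence.toList pos).drop 1) 1 (by omega)
      ⟨j, hj, by omega⟩
    obtain ⟨k, hk⟩ := Option.isSome_iff_exists.mp hpure
    have hgoA : goA sentence.toList pos 1 (2 * sentence.toList.length + 2) = some (pos + 1 + k) := by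
      rw [bridgeA sentence.toList ((pvStream sentence.toList pos).drop 1) pos 1
          (2 * sentence.toList.length + 2) (by omega) (stream_len_lt _ _)
          (streamGet sentence.toList pos (by simp [hc]))]
      rw [hk]; rfl
    have hgoB : goB sentence.toList pos (2 * sentence.toList.length + 2) = some (pos + 1 + k) := by
      have hl := loopB_eq sentence.toList _ _ pos (pos + 1 + k) (Nat.le_refl _) hgoA
      unfold goB
      rw [hc]
      simpa using hl
    rw [if_neg (show ¬ ('(' : Char) ≠ '(' by simp), hgoA, hgoB]
    rfl
  · -- any other character: both return pos unchanged
    have hgoB : goB sentence.toList pos (2 * sentence.toList.length + 2) = some pos := by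
      unfold goB; rw [hc]; simp [hpar]
    rw [if_pos hpar, hgoB]
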